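-- pv_equiv track=rewrite | github.com/jgyy/python-programmer | func_basic/recursion.py | fib_exp
-- ===== SOURCE A (Python) =====
-- def fib_exp(n, p="", l=[]):
--     old = l
--     new = []
--     if n <= 1:
--         return f"f({n}) = {n}"
--     elif not old:
--         new = [n - 2, n - 1]
--         p += f"f({n}) = f({new[0]}) + f({new[1]})\n"
--         return fib_exp(n, p, new)
--     if max(old) == 1:
--         return p
--     for num in old:
--         if num > 1:
--             new.append(num - 2)
--             new.append(num - 1)
--         else:
--             new.append(num)
--     p += f"f({n}) = "
--     for num in new:
--         if num > 1:
--             p += f"f({num}) + "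
--     p += str(sum(filter(fil, new))) + "\n"
--
--     return fib_exp(n, p, new)
--
-- def fil(x):
--     if x > 1:
--         return False
--     else:
--         return True
-- ===== SOURCE B (Python) =====
-- def fib_exp(n, p="", l=[]):
--     if n <= 1:
--         return f"f({n}) = {n}"
--     old = l
--     while True:
--         if not old:
--             p += f"f({n}) = f({n - 2}) + f({n - 1})\n"
--             old = [n - 2, n - 1]
--             continue
--         if max(old) == 1:
--             return p
--         new = [y for x in old for y in ((x - 2, x - 1) if x > 1 else (x,))]
--         p += (f"f({n}) = "
--               + "".join(f"f({num}) + " for num in new if num > 1)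
--               + str(sum(x for x in new if x <= 1)) + "\n")
--         old = new
-- ===== Notes on version B (the rewrite author's own statement) =====
-- stated objective: idiomatic
-- what changed: Replaces A's tail recursion (re-checking n<=1 each call, building the level list and the printed terms with explicit append loops and a filter helper) by a single while-True loop using a flattening comprehension for the next level, ''.join for the term strings and a generator-expression sum; Pre_ excludes only inputs where A hits RecursionError (n>=2 with a nonempty l whose elements are all <= 0, where the level list never changes).
import Mathlib
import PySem

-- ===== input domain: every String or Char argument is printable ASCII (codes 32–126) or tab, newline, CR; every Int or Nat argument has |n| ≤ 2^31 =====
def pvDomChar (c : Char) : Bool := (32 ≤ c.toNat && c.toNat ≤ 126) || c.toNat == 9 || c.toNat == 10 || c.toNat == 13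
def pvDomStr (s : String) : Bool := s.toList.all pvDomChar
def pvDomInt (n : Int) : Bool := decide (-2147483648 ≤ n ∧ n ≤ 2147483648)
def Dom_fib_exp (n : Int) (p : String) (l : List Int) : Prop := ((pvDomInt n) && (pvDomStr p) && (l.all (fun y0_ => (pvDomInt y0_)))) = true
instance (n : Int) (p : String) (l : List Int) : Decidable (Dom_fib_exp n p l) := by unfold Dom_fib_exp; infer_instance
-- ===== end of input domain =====

-- B rewrites the tail recursion as a while-True loop with comprehensions/join (objective: idiomatic/simpler).

-- ===== PORT A =====
def fil (x : Int) : Bool := if x > 1 then false else true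

-- totality guard only: enough fuel for the recursion depth (= max of the list values, plus slack);
-- both ports use it, it selects no algorithm.
def pvFuel (n : Int) (l : List Int) : Nat :=
  n.toNat + l.foldl (fun a x => Nat.max a x.toNat) 0 + 8

def fib_exp_go : Nat → Int → List Char → List Int → List Char
  | 0, _, _, _ => []
  | fuel+1, n, p, l =>
    let old := l
    if n ≤ 1 then
      "f(".toList ++ PySem.Int.toChars n ++ ") = ".toList ++ PySem.Int.toChars n
    else if old = [] then
      let new : List Int := [n - 2, n - 1]
      let p := p ++ ("f(".toList ++ PySem.Int.toChars n ++ ") = f(".toList ++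
        PySem.Int.toChars (n - 2) ++ ") + f(".toList ++ PySem.Int.toChars (n - 1) ++ ")\n".toList)
      fib_exp_go fuel n p new
    else if (PySem.List.max? old (fun y => y)).getD 0 = 1 then p
    else
      let new := old.foldl
        (fun acc num => if num > 1 then (acc ++ [num - 2]) ++ [num - 1] else acc ++ [num]) []
      let p := p ++ ("f(".toList ++ PySem.Int.toChars n ++ ") = ".toList)
      let p := new.foldl
        (fun q num => if num > 1 then q ++ ("f(".toList ++ PySem.Int.toChars num ++ ") + ".toList) else q) p
      let p := p ++ PySem.Int.toChars ((new.filter fil).foldl (· + ·) 0) ++ "\n".toList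
      fib_exp_go fuel n p new

def fib_exp (n : Int) (p : String) (l : List Int) : String :=
  String.mk (fib_exp_go (pvFuel n l) n p.toList l)

-- ===== PORT B =====
def pvStep (x : Int) : List Int := if x > 1 then [x - 2, x - 1] else [x]

def pvTerm (num : Int) : List Char := "f(".toList ++ PySem.Int.toChars num ++ ") + ".toList

def fib_exp_alt_go : Nat → Int → List Char → List Int → List Char
  | 0, _, _, _ => []
  | fuel+1, n, p, old =>
    if old = [] then
      fib_exp_alt_go fuel n
        (p ++ ("f(".toList ++ PySem.Int.toChars n ++ ") = f(".toList ++
          PySem.Int.toChars (n - 2) ++ ") + f(".toList ++ PySem.Int.toChars (n - 1) ++ ")\n".toList))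
        [n - 2, n - 1]
    else if (PySem.List.max? old (fun y => y)).getD 0 = 1 then p
    else
      let new := old.flatMap pvStep
      let line := "f(".toList ++ PySem.Int.toChars n ++ ") = ".toList
        ++ ((new.filter (fun num => num > 1)).map pvTerm).flatten
        ++ PySem.Int.toChars ((new.filter (fun x => x ≤ 1)).foldl (· + ·) 0) ++ "\n".toList
      fib_exp_alt_go fuel n (p ++ line) new

def fib_exp_alt (n : Int) (p : String) (l : List Int) : String :=
  if n ≤ 1 then String.mk ("f(".toList ++ PySem.Int.toChars n ++ ") = ".toList ++ PySem.Int.toChars n)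
  else String.mk (fib_exp_alt_go (pvFuel n l) n p.toList l)

-- ===== PRECONDITION & SPEC =====
-- Pre_ excludes exactly the inputs where Python A never returns (RecursionError): n ≥ 2 with a
-- nonempty l all of whose elements are ≤ 0 — there the level list never changes and max stays ≠ 1.
def Pre_fib_exp (n : Int) (p : String) (l : List Int) : Prop :=
  n ≤ 1 ∨ l = [] ∨ l.any (fun x => 1 ≤ x) = true
instance (n : Int) (p : String) (l : List Int) : Decidable (Pre_fib_exp n p l) := by
  unfold Pre_fib_exp; infer_instance

def pvWitness_fib_exp : Int × String × List Int := (5, "", [])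

def Spec_fib_exp (n : Int) (p : String) (l : List Int) (out : String) : Prop := out = fib_exp_alt n p l
instance (n : Int) (p : String) (l : List Int) (out : String) : Decidable (Spec_fib_exp n p l out) := by
  unfold Spec_fib_exp; infer_instance

-- ===== CLAIM (what is proved, stated in full; the proofs are below) =====
def Claim_equal_fib_exp : Prop := ∀ (n : Int) (p : String) (l : List Int),
  Dom_fib_exp n p l → Pre_fib_exp n p l → Spec_fib_exp n p l (fib_exp n p l)

-- ===== LEMMAS AND PROOFS =====

theorem fil_eq : fil = fun x : Int => decide (x ≤ 1) := by
  funext x; unfold fil; split <;> simp <;> omega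

theorem newA_eq (l : List Int) (acc : List Int) :
    l.foldl (fun acc num => if num > 1 then (acc ++ [num - 2]) ++ [num - 1] else acc ++ [num]) acc
      = acc ++ l.flatMap pvStep := by
  induction l generalizing acc with
  | nil => simp
  | cons x t ih =>
    rw [List.foldl_cons, List.flatMap_cons]
    by_cases h : x > 1
    · rw [if_pos h, ih]; simp [pvStep, h, List.append_assoc]
    · rw [if_neg h, ih]; simp [pvStep, h]

theorem termsFold (new : List Int) (q : List Char) :
    new.foldl (fun q num =>
        if num > 1 then q ++ ("f(".toList ++ PySem.Int.toChars num ++ ") + ".toList) else q) q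
      = q ++ ((new.filter (fun num => num > 1)).map pvTerm).flatten := by
  induction new generalizing q with
  | nil => simp
  | cons x t ih =>
    simp only [List.foldl_cons, List.filter_cons]
    split
    · next h =>
      rw [if_pos (by simpa using h), ih]
      simp [pvTerm, List.append_assoc]
    · next h =>
      rw [if_neg (by simpa using h)]
      exact ih q

theorem go_eq (fuel : Nat) : ∀ (n : Int) (p : List Char) (l : List Int), 1 < n →
    fib_exp_go fuel n p l = fib_exp_alt_go fuel n p l := by
  induction fuel with
  | zero => intro n p l _; rfl
  | succ f ih =>
    intro n p l hn
    simp only [fib_exp_go, fib_exp_alt_go]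
    rw [if_neg (by omega : ¬ n ≤ 1)]
    by_cases hl : l = []
    · rw [if_pos hl, if_pos hl]
      exact ih n _ _ hn
    · rw [if_neg hl, if_neg hl]
      by_cases hm : (PySem.List.max? l (fun y => y)).getD 0 = 1
      · rw [if_pos hm, if_pos hm]
      · rw [if_neg hm, if_neg hm]
        rw [newA_eq, List.nil_append, termsFold, fil_eq]
        rw [ih n _ _ hn]
        simp [List.append_assoc]

theorem fib_exp_spec : Claim_equal_fib_exp := by
  intro n p l _ _
  unfold Spec_fib_exp fib_exp fib_exp_alt
  by_cases hn : n ≤ 1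
  · have hf : pvFuel n l = (n.toNat + l.foldl (fun a x => Nat.max a x.toNat) 0 + 7) + 1 := by
      unfold pvFuel; omega
    rw [hf, if_pos hn]
    simp only [fib_exp_go, if_pos hn]
  · rw [if_neg hn, go_eq _ _ _ _ (by omega)]
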